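-- pv_equiv track=rewrite | github.com/mochilang/mochi | tests/leetcode/x/python/0411.py | abbr_len
-- ===== SOURCE A (Python) =====
-- def abbr_len(mask: int, n: int) -> int:
--     total = 0
--     skipped = False
--     for i in range(n):
--         if (mask >> i) & 1:
--             if skipped:
--                 total += 1
--                 skipped = False
--             total += 1
--         else:
--             skipped = True
--     return total + (1 if skipped else 0)
-- ===== SOURCE B (Python) =====
-- def abbr_len(mask: int, n: int) -> int:
--     # Loop-free closed form.  Only the first k = min(n, mask.bit_length()+1) bits matter:
--     # every higher bit equals the sign bit, so for mask >= 0 they extend one zero run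
--     # (already counted), and for mask < 0 each of the n-k extra one-bits adds exactly 1.
--     # On the k-bit window: popcount(kept bits) + popcount(zero-run-start bits), where the
--     # run-start bit set is built word-parallel as complement(m) & ((m<<1)|1).
--     if n <= 0:
--         return 0
--     k = min(n, mask.bit_length() + 1)
--     p = 1 << k
--     m = mask % p                      # the k relevant bits, as a nonnegative integer
--     z = (p - 1) - m                   # bitwise complement of those k bits
--     starts = z & ((2 * m + 1) % p)    # zero bits whose predecessor bit (or the left boundary) is one
--     tail = (n - k) if mask < 0 else 0
--     return bin(m).count("1") + bin(starts).count("1") + tail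
-- ===== Notes on version B (the rewrite author's own statement) =====
-- stated objective: alternative
-- what changed: B replaces A's per-bit flag loop with a loop-free closed form on big integers: reduce mask modulo 2**n to get the n relevant bits m, build the zero-run-start bit set word-parallel as complement(m) & ((m<<1)|1) using arithmetic, and return popcount(m) + popcount(starts).
import Mathlib
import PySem

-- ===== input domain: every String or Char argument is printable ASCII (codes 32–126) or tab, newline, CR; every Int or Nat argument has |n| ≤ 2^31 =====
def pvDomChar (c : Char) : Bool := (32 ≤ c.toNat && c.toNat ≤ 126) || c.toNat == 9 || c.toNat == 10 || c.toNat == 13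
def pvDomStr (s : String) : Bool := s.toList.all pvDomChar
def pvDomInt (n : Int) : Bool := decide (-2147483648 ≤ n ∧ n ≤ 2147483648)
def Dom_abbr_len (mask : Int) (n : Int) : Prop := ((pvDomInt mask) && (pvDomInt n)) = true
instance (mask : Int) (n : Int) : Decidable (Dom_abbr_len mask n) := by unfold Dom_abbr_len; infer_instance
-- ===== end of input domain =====

-- B replaces A's per-bit flag loop by a loop-free closed form on a window of
-- min(n, bit_length+1) bits (higher bits equal the sign bit and contribute a closed-form
-- tail): zero-run starts are built word-parallel and two popcounts are added.

-- ===== PORT A =====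
-- loop body of A: state (total, skipped), deferred +1 charged when the next set bit arrives
def abbrStepA (mask : Int) (st : Int × Bool) (i : Int) : Int × Bool :=
  if PySem.Int.band (mask >>> i.toNat) 1 ≠ 0 then
    if st.2 then (st.1 + 1 + 1, false) else (st.1 + 1, st.2)
  else (st.1, true)

def abbr_len (mask : Int) (n : Int) : Int :=
  let r := (PySem.List.pyRange 0 n 1).foldl (abbrStepA mask) (0, false)
  r.1 + (if r.2 then 1 else 0)

-- ===== PORT B =====
-- mask.bit_length() is PySem.Int.bitLength; bin(k).count("1") on a nonnegative k is
-- exactly the popcount PySem.Int.bitCount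
def abbr_len_alt (mask : Int) (n : Int) : Int :=
  if n ≤ 0 then 0
  else
    let k : Int := min n ((PySem.Int.bitLength mask : Int) + 1)
    let p : Int := 1 <<< k.toNat
    let m : Int := PySem.Int.mod mask p
    let z : Int := (p - 1) - m
    let starts : Int := PySem.Int.band z (PySem.Int.mod (2 * m + 1) p)
    let tail : Int := if mask < 0 then n - k else 0
    (PySem.Int.bitCount m : Int) + (PySem.Int.bitCount starts : Int) + tail

-- ===== PRECONDITION & SPEC =====
def Spec_abbr_len (mask : Int) (n : Int) (out : Int) : Prop := out = abbr_len_alt mask n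
instance (mask : Int) (n : Int) (out : Int) : Decidable (Spec_abbr_len mask n out) := by unfold Spec_abbr_len; infer_instance

-- ===== CLAIM (what is proved, stated in full; the proofs are below) =====
def Claim_equal_abbr_len : Prop := ∀ (mask : Int) (n : Int), Dom_abbr_len mask n → Spec_abbr_len mask n (abbr_len mask n)

-- ===== LEMMAS AND PROOFS =====

-- intermediate characterisation of A's loop: recursion on the number of bits, low bit first
def Fcnt : Bool → Int → Nat → Int
  | p0, _, 0 => if p0 then 1 else 0
  | p0, mask, N+1 =>
      if PySem.Int.band mask 1 ≠ 0 then
        (if p0 then 2 else 1) + Fcnt false (mask >>> (1:Nat)) N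
      else Fcnt true (mask >>> (1:Nat)) N

def pvPc (k : Nat) : Int := (PySem.Int.bitCount (k : Int) : Int)

def pvM (mask : Int) (N : Nat) : Nat := (mask % ((2:Int)^N)).toNat

def pvStarts (mask : Int) (N : Nat) (c : Nat) : Nat :=
  (2^N - 1 - pvM mask N) &&& ((2 * pvM mask N + c) % 2^N)

lemma pv_emod_double (x m : Int) (hm : 0 < m) :
    x % (2*m) = 2 * (x / 2 % m) + x % 2 := by
  have h0 : 2 * (x / 2) + x % 2 = x := Int.mul_ediv_add_emod x 2
  have h1 : m * (x / 2 / m) + (x / 2) % m = x / 2 := Int.mul_ediv_add_emod (x/2) m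
  have hx : x = (2 * (x / 2 % m) + x % 2) + (2*m) * (x / 2 / m) := by
    linear_combination -h0 - 2*h1
  have hA0 : 0 ≤ (x/2) % m := Int.emod_nonneg _ hm.ne'
  have hA1 : (x/2) % m < m := Int.emod_lt_of_pos _ hm
  have hB0 : 0 ≤ x % 2 := Int.emod_nonneg _ (by norm_num)
  have hB1 : x % 2 < 2 := Int.emod_lt_of_pos _ (by norm_num)
  conv_lhs => rw [hx]
  rw [Int.add_mul_emod_self_left]
  exact Int.emod_eq_of_lt (by omega) (by omega)

lemma pv_nat_mod_double (q r m : Nat) (hm : 0 < m) (hr : r ≤ 1) :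
    (2*q + r) % (2*m) = 2*(q % m) + r := by
  have h1 : q % m < m := Nat.mod_lt _ hm
  have key : 2*q + r = (2*(q % m) + r) + (q / m)*(2*m) := by
    conv_lhs => rw [← Nat.div_add_mod q m]
    ring
  rw [key, Nat.add_mul_mod_self_right]
  exact Nat.mod_eq_of_lt (by omega)

lemma pv_and_mod_two (z y : Nat) : (z &&& y) % 2 = z % 2 * (y % 2) := by
  rw [← Nat.and_one_is_mod (z &&& y), Nat.and_assoc, Nat.and_one_is_mod y]
  rcases Nat.mod_two_eq_zero_or_one y with hy | hy
  · rw [hy, Nat.and_zero]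
    omega
  · rw [hy, Nat.and_one_is_mod z]
    omega

lemma pv_and_double (a b u v : Nat) (hu : u ≤ 1) (hv : v ≤ 1) :
    (2*a+u) &&& (2*b+v) = 2*(a &&& b) + u*v := by
  have hu' : (2*a+u) % 2 = u := by omega
  have hv' : (2*b+v) % 2 = v := by omega
  have hm := pv_and_mod_two (2*a+u) (2*b+v)
  rw [hu', hv'] at hm
  have hd : ((2*a+u) &&& (2*b+v)) / 2 = a &&& b := by
    rw [Nat.and_div_two]
    congr 1 <;> omega
  interval_cases u <;> interval_cases v <;> omega

lemma pvPc_split (X : Nat) : pvPc X = ((X % 2 : Nat) : Int) + pvPc (X / 2) := by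
  rcases Nat.eq_zero_or_pos X with h | h
  · subst h; simp [pvPc, PySem.Int.bitCount_zero]
  · have hh := PySem.Int.bitCount_natCast h
    unfold pvPc
    rw [hh]; push_cast; ring

lemma pvPc_double (a b : Nat) (hb : b ≤ 1) : pvPc (2*a + b) = b + pvPc a := by
  rw [pvPc_split]
  have h1 : (2*a+b) % 2 = b := by omega
  have h2 : (2*a+b) / 2 = a := by omega
  rw [h1, h2]

lemma pv_shiftRight_one (mask : Int) : mask >>> (1:Nat) = mask / 2 := by
  rw [Int.shiftRight_eq_div_pow]; norm_num

lemma pvM_succ (mask : Int) (N : Nat) :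
    pvM mask (N+1) = 2 * pvM (mask >>> (1:Nat)) N + (mask % 2).toNat := by
  unfold pvM
  have hd := pv_emod_double mask ((2:Int)^N) (by positivity)
  have hpow : ((2:Int)^(N+1)) = 2 * 2^N := by ring
  rw [hpow, hd, pv_shiftRight_one]
  have h0 : 0 ≤ mask / 2 % ((2:Int)^N) := Int.emod_nonneg _ (by positivity)
  have h1 : 0 ≤ mask % 2 := Int.emod_nonneg _ (by norm_num)
  omega

lemma pvM_lt (mask : Int) (N : Nat) : pvM mask N < 2^N := by
  unfold pvM
  have h0 : 0 ≤ mask % ((2:Int)^N) := Int.emod_nonneg _ (by positivity)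
  have h1 : mask % ((2:Int)^N) < 2^N := Int.emod_lt_of_pos _ (by positivity)
  have h2 : ((2^N : Nat) : Int) = (2:Int)^N := by push_cast; ring
  omega

lemma pvStarts_succ (mask : Int) (N : Nat) (c : Nat) (hc : c ≤ 1) :
    pvStarts mask (N+1) c
      = 2 * pvStarts (mask >>> (1:Nat)) N ((mask % 2).toNat) + (1 - (mask % 2).toNat) * c := by
  have hb0 : 0 ≤ mask % 2 := Int.emod_nonneg _ (by norm_num)
  have hb2 : mask % 2 < 2 := Int.emod_lt_of_pos _ (by norm_num)
  have hb1 : (mask % 2).toNat ≤ 1 := by omega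
  have hM'lt : pvM (mask >>> (1:Nat)) N < 2^N := pvM_lt _ N
  unfold pvStarts
  rw [pvM_succ mask N]
  have hpow : (2:Nat)^(N+1) = 2 * 2^N := by ring
  rw [hpow]
  have hz : 2 * 2^N - 1 - (2 * pvM (mask >>> (1:Nat)) N + (mask % 2).toNat)
      = 2*(2^N - 1 - pvM (mask >>> (1:Nat)) N) + (1 - (mask % 2).toNat) := by omega
  have hy : (2*(2 * pvM (mask >>> (1:Nat)) N + (mask % 2).toNat) + c) % (2 * 2^N)
      = 2*((2 * pvM (mask >>> (1:Nat)) N + (mask % 2).toNat) % 2^N) + c :=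
    pv_nat_mod_double _ c (2^N) (by positivity) hc
  rw [hz, hy]
  exact pv_and_double _ _ _ _ (by omega) hc

-- A's loop counter characterised as a closed form: popcount of the kept bits
-- plus popcount of the zero-run-start bits (the previous bit encoded by p0)
lemma pv_CF : ∀ (N : Nat) (mask : Int) (p0 : Bool),
    Fcnt p0 mask N
      = pvPc (pvM mask N) + pvPc (pvStarts mask N (if p0 then 0 else 1))
        + (if p0 then 1 else 0) := by
  intro N
  induction N with
  | zero =>
    intro mask p0
    have h1 : pvM mask 0 = 0 := by unfold pvM; simp
    cases p0 <;> simp [Fcnt, pvStarts, h1, pvPc, PySem.Int.bitCount_zero]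
  | succ N ih =>
    intro mask p0
    have hb0 : 0 ≤ mask % 2 := Int.emod_nonneg _ (by norm_num)
    have hb2 : mask % 2 < 2 := Int.emod_lt_of_pos _ (by norm_num)
    have hb1 : (mask % 2).toNat ≤ 1 := by omega
    have hband : PySem.Int.band mask 1 = mask % 2 := by
      rw [PySem.Int.band_one, PySem.Int.mod_eq_emod_of_pos (by norm_num)]
    have hM := pvM_succ mask N
    have hS := pvStarts_succ mask N (if p0 then 0 else 1) (by split <;> omega)
    have hFc : Fcnt p0 mask (N+1)
        = if PySem.Int.band mask 1 ≠ 0 then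
            (if p0 then 2 else 1) + Fcnt false (mask >>> (1:Nat)) N
          else Fcnt true (mask >>> (1:Nat)) N := rfl
    rcases Nat.le_one_iff_eq_zero_or_eq_one.mp hb1 with hb | hb
    · -- low bit is 0
      have hcond : ¬ PySem.Int.band mask 1 ≠ 0 := by rw [hband]; omega
      rw [hFc, if_neg hcond, ih (mask >>> (1:Nat)) true, hM, hS, hb]
      rw [pvPc_double _ 0 (by omega)]
      rw [show (1 - 0) * (if p0 then (0:Nat) else 1) = (if p0 then 0 else 1) by simp]
      rw [pvPc_double _ (if p0 then 0 else 1) (by split <;> omega)]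
      cases p0 <;> (simp; try omega)
    · -- low bit is 1
      have hcond : PySem.Int.band mask 1 ≠ 0 := by rw [hband]; omega
      rw [hFc, if_pos hcond, ih (mask >>> (1:Nat)) false, hM, hS, hb]
      rw [pvPc_double _ 1 (by omega)]
      rw [show (1 - 1) * (if p0 then (0:Nat) else 1) = 0 by simp]
      rw [pvPc_double _ 0 (by omega)]
      cases p0 <;> (simp; try omega)

-- shifting the loop window: indices a+1 … a+k over mask are indices a … a+k-1 over mask>>1
lemma pv_shiftFold : ∀ (k : Nat) (mask a : Int), 0 ≤ a → ∀ (st : Int × Bool),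
    (PySem.List.pyRange (a+1) (a + k + 1) 1).foldl (abbrStepA mask) st
    = (PySem.List.pyRange a (a + k) 1).foldl (abbrStepA (mask >>> (1:Nat))) st := by
  intro k
  induction k with
  | zero =>
    intro mask a ha st
    have h1 : PySem.List.pyRange (a+1) (a + ((0:Nat):Int) + 1) 1 = [] := by
      simp [pysem]
    have h2 : PySem.List.pyRange a (a + ((0:Nat):Int)) 1 = [] := by
      simp [pysem]
    rw [h1, h2]
    rfl
  | succ k ih =>
    intro mask a ha st
    have hc1 : a + 1 < a + ((k+1:Nat):Int) + 1 := by push_cast; omega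
    have hc2 : a < a + ((k+1:Nat):Int) := by push_cast; omega
    rw [PySem.List.pyRange_one_cons hc1, PySem.List.pyRange_one_cons hc2]
    simp only [List.foldl_cons]
    have hstep : abbrStepA mask st (a+1) = abbrStepA (mask >>> (1:Nat)) st a := by
      unfold abbrStepA
      have ht : (a+1).toNat = 1 + a.toNat := by omega
      rw [ht, Int.shiftRight_add]
    rw [hstep]
    have e1 : a + ((k+1:Nat):Int) + 1 = (a+1) + ((k:Nat):Int) + 1 := by push_cast; ring
    have e2 : a + ((k+1:Nat):Int) = (a+1) + ((k:Nat):Int) := by push_cast; ring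
    rw [e1, e2]
    exact ih mask (a+1) (by omega) _

-- A's fold equals the intermediate recursion Fcnt
lemma pv_main : ∀ (N : Nat) (mask total : Int) (skipped : Bool),
    ((PySem.List.pyRange 0 (N:Int) 1).foldl (abbrStepA mask) (total, skipped)).1
      + (if ((PySem.List.pyRange 0 (N:Int) 1).foldl (abbrStepA mask) (total, skipped)).2
          then 1 else 0)
    = total + Fcnt skipped mask N := by
  intro N
  induction N with
  | zero =>
    intro mask total skipped
    have h1 : PySem.List.pyRange 0 ((0:Nat):Int) 1 = [] := by simp [pysem]
    rw [h1]
    cases skipped <;> simp [Fcnt]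
  | succ N ih =>
    intro mask total skipped
    have h0 : (0:Int) < ((N+1:Nat):Int) := by push_cast; omega
    simp only [PySem.List.pyRange_one_cons h0, List.foldl_cons]
    have e1 : PySem.List.pyRange ((0:Int)+1) (((N+1:Nat)):Int) 1
        = PySem.List.pyRange ((0:Int)+1) ((0:Int) + ((N:Nat):Int) + 1) 1 := by
      norm_num
    have e2 := pv_shiftFold N mask 0 le_rfl
    have e3 : (0:Int) + ((N:Nat):Int) = ((N:Nat):Int) := by ring
    simp only [e1]
    simp only [e2]
    simp only [e3]
    by_cases hb : PySem.Int.band mask 1 ≠ 0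
    · cases skipped with
      | true =>
        have hstep : abbrStepA mask (total, true) 0 = (total + 1 + 1, false) := by
          simp [abbrStepA, hb]
        simp only [hstep]
        rw [ih (mask >>> (1:Nat)) (total + 1 + 1) false]
        rw [show Fcnt true mask (N+1)
              = if PySem.Int.band mask 1 ≠ 0 then 2 + Fcnt false (mask >>> (1:Nat)) N
                else Fcnt true (mask >>> (1:Nat)) N from rfl, if_pos hb]
        omega
      | false =>
        have hstep : abbrStepA mask (total, false) 0 = (total + 1, false) := by
          simp [abbrStepA, hb]
        simp only [hstep]
        rw [ih (mask >>> (1:Nat)) (total + 1) false]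
        rw [show Fcnt false mask (N+1)
              = if PySem.Int.band mask 1 ≠ 0 then 1 + Fcnt false (mask >>> (1:Nat)) N
                else Fcnt true (mask >>> (1:Nat)) N from rfl, if_pos hb]
        omega
    · have hstep : abbrStepA mask (total, skipped) 0 = (total, true) := by
        simp [abbrStepA, hb]
      simp only [hstep]
      rw [ih (mask >>> (1:Nat)) total true]
      cases skipped with
      | true =>
        rw [show Fcnt true mask (N+1)
              = if PySem.Int.band mask 1 ≠ 0 then 2 + Fcnt false (mask >>> (1:Nat)) N
                else Fcnt true (mask >>> (1:Nat)) N from rfl, if_neg hb]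
        try rfl
      | false =>
        rw [show Fcnt false mask (N+1)
              = if PySem.Int.band mask 1 ≠ 0 then 1 + Fcnt false (mask >>> (1:Nat)) N
                else Fcnt true (mask >>> (1:Nat)) N from rfl, if_neg hb]
        try rfl

-- A at a nonnegative bit count N
lemma pv_A_closed (mask : Int) (N : Nat) :
    abbr_len mask ((N:Nat):Int) = Fcnt false mask N := by
  unfold abbr_len
  simpa using pv_main N mask 0 false

-- all-zero mask: the single zero run contributes exactly 1
lemma pv_Fcnt_zero : ∀ (N : Nat) (p0 : Bool), 1 ≤ N → Fcnt p0 0 N = 1 := by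
  intro N
  induction N with
  | zero => intro p0 h; omega
  | succ N ih =>
    intro p0 _
    rw [show Fcnt p0 0 (N+1)
          = if PySem.Int.band 0 1 ≠ 0 then (if p0 then 2 else 1) + Fcnt false ((0:Int) >>> (1:Nat)) N
            else Fcnt true ((0:Int) >>> (1:Nat)) N from rfl]
    rw [if_neg (by decide), show (0:Int) >>> (1:Nat) = 0 from by decide]
    rcases Nat.eq_zero_or_pos N with h | h
    · subst h; simp [Fcnt]
    · exact ih true h

-- all-one mask: every bit is kept, plus a possible pending run charge
lemma pv_Fcnt_negone : ∀ (N : Nat) (p0 : Bool), Fcnt p0 (-1) N = (if p0 then 1 else 0) + (N : Int) := by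
  intro N
  induction N with
  | zero => intro p0; simp [Fcnt]
  | succ N ih =>
    intro p0
    rw [show Fcnt p0 (-1) (N+1)
          = if PySem.Int.band (-1) 1 ≠ 0 then (if p0 then 2 else 1) + Fcnt false ((-1:Int) >>> (1:Nat)) N
            else Fcnt true ((-1:Int) >>> (1:Nat)) N from rfl]
    rw [if_pos (by decide), show ((-1):Int) >>> (1:Nat) = -1 from by decide, ih false]
    cases p0 <;> simp <;> omega

-- the counter is stable once all remaining bits are zero (nonnegative mask)
lemma pv_stab_pos : ∀ (J : Nat) (mask : Int) (N : Nat) (p0 : Bool),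
    0 ≤ mask → mask < 2^J → J + 1 ≤ N → Fcnt p0 mask N = Fcnt p0 mask (J+1) := by
  intro J
  induction J with
  | zero =>
    intro mask N p0 h0 h1 hN
    have h1' : mask < 1 := by simpa using h1
    have hm : mask = 0 := by omega
    subst hm
    rw [pv_Fcnt_zero N p0 (by omega), pv_Fcnt_zero 1 p0 (by omega)]
  | succ J ih =>
    intro mask N p0 h0 h1 hN
    obtain ⟨N', rfl⟩ : ∃ N', N = N' + 1 := ⟨N - 1, by omega⟩
    have hsh : 0 ≤ mask >>> (1:Nat) := by
      rw [pv_shiftRight_one]; omega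
    have hlt : mask >>> (1:Nat) < 2^J := by
      rw [pv_shiftRight_one]
      have h2 : ((2:Int))^(J+1) = 2 * 2^J := by ring
      rw [h2] at h1
      omega
    by_cases hb : PySem.Int.band mask 1 ≠ 0
    · rw [show Fcnt p0 mask (N'+1)
            = if PySem.Int.band mask 1 ≠ 0 then (if p0 then 2 else 1) + Fcnt false (mask >>> (1:Nat)) N'
              else Fcnt true (mask >>> (1:Nat)) N' from rfl, if_pos hb]
      rw [show Fcnt p0 mask (J+1+1)
            = if PySem.Int.band mask 1 ≠ 0 then (if p0 then 2 else 1) + Fcnt false (mask >>> (1:Nat)) (J+1)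
              else Fcnt true (mask >>> (1:Nat)) (J+1) from rfl, if_pos hb]
      rw [ih (mask >>> (1:Nat)) N' false hsh hlt (by omega)]
    · rw [show Fcnt p0 mask (N'+1)
            = if PySem.Int.band mask 1 ≠ 0 then (if p0 then 2 else 1) + Fcnt false (mask >>> (1:Nat)) N'
              else Fcnt true (mask >>> (1:Nat)) N' from rfl, if_neg hb]
      rw [show Fcnt p0 mask (J+1+1)
            = if PySem.Int.band mask 1 ≠ 0 then (if p0 then 2 else 1) + Fcnt false (mask >>> (1:Nat)) (J+1)
              else Fcnt true (mask >>> (1:Nat)) (J+1) from rfl, if_neg hb]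
      rw [ih (mask >>> (1:Nat)) N' true hsh hlt (by omega)]

-- once all remaining bits are one (negative mask) each extra bit adds exactly 1
lemma pv_stab_neg : ∀ (J : Nat) (mask : Int) (N : Nat) (p0 : Bool),
    mask < 0 → -(2^J) ≤ mask → J + 1 ≤ N →
    Fcnt p0 mask N = Fcnt p0 mask (J+1) + ((N : Int) - ((J : Int) + 1)) := by
  intro J
  induction J with
  | zero =>
    intro mask N p0 h0 h1 hN
    have h1' : -1 ≤ mask := by simpa using h1
    have hm : mask = -1 := by omega
    subst hm
    rw [pv_Fcnt_negone N p0, pv_Fcnt_negone 1 p0]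
    push_cast
    ring
  | succ J ih =>
    intro mask N p0 h0 h1 hN
    obtain ⟨N', rfl⟩ : ∃ N', N = N' + 1 := ⟨N - 1, by omega⟩
    have hsh : mask >>> (1:Nat) < 0 := by
      rw [pv_shiftRight_one]; omega
    have hge : -(2^J) ≤ mask >>> (1:Nat) := by
      rw [pv_shiftRight_one]
      have h2 : ((2:Int))^(J+1) = 2 * 2^J := by ring
      rw [h2] at h1
      omega
    have hNc : ((N' + 1 : Nat) : Int) = (N' : Int) + 1 := by push_cast; ring
    by_cases hb : PySem.Int.band mask 1 ≠ 0
    · rw [show Fcnt p0 mask (N'+1)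
            = if PySem.Int.band mask 1 ≠ 0 then (if p0 then 2 else 1) + Fcnt false (mask >>> (1:Nat)) N'
              else Fcnt true (mask >>> (1:Nat)) N' from rfl, if_pos hb]
      rw [show Fcnt p0 mask (J+1+1)
            = if PySem.Int.band mask 1 ≠ 0 then (if p0 then 2 else 1) + Fcnt false (mask >>> (1:Nat)) (J+1)
              else Fcnt true (mask >>> (1:Nat)) (J+1) from rfl, if_pos hb]
      rw [ih (mask >>> (1:Nat)) N' false hsh hge (by omega), hNc]
      push_cast
      ring
    · rw [show Fcnt p0 mask (N'+1)
            = if PySem.Int.band mask 1 ≠ 0 then (if p0 then 2 else 1) + Fcnt false (mask >>> (1:Nat)) N'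
              else Fcnt true (mask >>> (1:Nat)) N' from rfl, if_neg hb]
      rw [show Fcnt p0 mask (J+1+1)
            = if PySem.Int.band mask 1 ≠ 0 then (if p0 then 2 else 1) + Fcnt false (mask >>> (1:Nat)) (J+1)
              else Fcnt true (mask >>> (1:Nat)) (J+1) from rfl, if_neg hb]
      rw [ih (mask >>> (1:Nat)) N' true hsh hge (by omega), hNc]
      push_cast
      ring

-- B's let-chain expressed through the Nat-level closed form on the k-bit window
lemma pv_B_closed (mask : Int) (N : Nat) (hN : 0 < N) :
    abbr_len_alt mask ((N:Nat):Int)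
      = pvPc (pvM mask (min N (PySem.Int.bitLength mask + 1)))
        + pvPc (pvStarts mask (min N (PySem.Int.bitLength mask + 1)) 1)
        + (if mask < 0 then ((N : Int) - ((min N (PySem.Int.bitLength mask + 1) : Nat) : Int)) else 0) := by
  have hn0 : ¬ (((N:Nat):Int) ≤ 0) := by omega
  have hKpos : 0 < min N (PySem.Int.bitLength mask + 1) := by omega
  have htn : (min ((N:Nat):Int) (((PySem.Int.bitLength mask : Nat):Int) + 1)).toNat
      = min N (PySem.Int.bitLength mask + 1) := by omega
  have hkInt : min ((N:Nat):Int) (((PySem.Int.bitLength mask : Nat):Int) + 1)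
      = ((min N (PySem.Int.bitLength mask + 1) : Nat) : Int) := by omega
  have hpos : (0:Int) < (2:Int)^(min N (PySem.Int.bitLength mask + 1)) := by positivity
  have hm0 : 0 ≤ mask % (2:Int)^(min N (PySem.Int.bitLength mask + 1)) := Int.emod_nonneg _ hpos.ne'
  have hp2 : (((1 <<< min N (PySem.Int.bitLength mask + 1) : Nat)) : Int)
      = (2:Int)^(min N (PySem.Int.bitLength mask + 1)) := by
    rw [Nat.shiftLeft_eq]
    push_cast
    ring
  have hm : PySem.Int.mod mask (((1 <<< min N (PySem.Int.bitLength mask + 1) : Nat)) : Int)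
      = ((pvM mask (min N (PySem.Int.bitLength mask + 1)) : Nat) : Int) := by
    rw [hp2, PySem.Int.mod_eq_emod_of_pos hpos]
    unfold pvM
    omega
  have hMlt := pvM_lt mask (min N (PySem.Int.bitLength mask + 1))
  have hP : ((2^(min N (PySem.Int.bitLength mask + 1)) : Nat) : Int)
      = (2:Int)^(min N (PySem.Int.bitLength mask + 1)) := by push_cast; ring
  have hz : (((1 <<< min N (PySem.Int.bitLength mask + 1) : Nat)) : Int) - 1
        - ((pvM mask (min N (PySem.Int.bitLength mask + 1)) : Nat) : Int)
      = ((2^(min N (PySem.Int.bitLength mask + 1)) - 1 - pvM mask (min N (PySem.Int.bitLength mask + 1)) : Nat) : Int) := by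
    rw [hp2, ← hP]
    omega
  have hy : PySem.Int.mod (2 * ((pvM mask (min N (PySem.Int.bitLength mask + 1)) : Nat) : Int) + 1)
        (((1 <<< min N (PySem.Int.bitLength mask + 1) : Nat)) : Int)
      = (((2 * pvM mask (min N (PySem.Int.bitLength mask + 1)) + 1) % 2^(min N (PySem.Int.bitLength mask + 1)) : Nat) : Int) := by
    rw [hp2, PySem.Int.mod_eq_emod_of_pos hpos, ← hP]
    push_cast
    ring_nf
  simp only [abbr_len_alt, if_neg hn0]
  rw [htn, hkInt, hm, hz, hy, PySem.Int.band_natCast]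
  unfold pvPc pvStarts
  rfl

-- ===== VERDICT (by name: the statement is the Claim_ definition above) =====
theorem abbr_len_spec : Claim_equal_abbr_len := by
  intro mask n _
  unfold Spec_abbr_len
  by_cases hn : n ≤ 0
  · have h1 : PySem.List.pyRange 0 n 1 = [] := by simp [pysem, hn]
    unfold abbr_len abbr_len_alt
    simp only [h1, if_pos hn]
    simp
  · have hc : ((n.toNat : Nat) : Int) = n := Int.toNat_of_nonneg (by omega)
    have hNpos : 0 < n.toNat := by omega
    have hB := pv_B_closed mask n.toNat hNpos
    have hA : abbr_len mask n = Fcnt false mask n.toNat := by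
      rw [← hc]
      exact pv_A_closed mask n.toNat
    have hCF : ∀ M : Nat, Fcnt false mask M = pvPc (pvM mask M) + pvPc (pvStarts mask M 1) := by
      intro M
      have h := pv_CF M mask false
      simpa using h
    have hstab : Fcnt false mask n.toNat
        = pvPc (pvM mask (min n.toNat (PySem.Int.bitLength mask + 1)))
          + pvPc (pvStarts mask (min n.toNat (PySem.Int.bitLength mask + 1)) 1)
          + (if mask < 0 then ((n.toNat : Int) - ((min n.toNat (PySem.Int.bitLength mask + 1) : Nat) : Int)) else 0) := by
      by_cases hLN : PySem.Int.bitLength mask + 1 ≤ n.toNat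
      · have hmin : min n.toNat (PySem.Int.bitLength mask + 1) = PySem.Int.bitLength mask + 1 :=
          min_eq_right hLN
        have habs := PySem.Int.lt_two_pow_bitLength mask
        have hcast : ((2^(PySem.Int.bitLength mask) : Nat) : Int) = (2:Int)^(PySem.Int.bitLength mask) := by
          push_cast; ring
        rw [hmin]
        by_cases hms : mask < 0
        · have hge : -((2:Int)^(PySem.Int.bitLength mask)) ≤ mask := by omega
          rw [pv_stab_neg (PySem.Int.bitLength mask) mask n.toNat false hms hge hLN]
          rw [hCF (PySem.Int.bitLength mask + 1), if_pos hms]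
          push_cast
          ring
        · have hlt : mask < (2:Int)^(PySem.Int.bitLength mask) := by omega
          rw [pv_stab_pos (PySem.Int.bitLength mask) mask n.toNat false (not_lt.mp hms) hlt hLN]
          rw [hCF (PySem.Int.bitLength mask + 1), if_neg hms]
          ring
      · have hmin : min n.toNat (PySem.Int.bitLength mask + 1) = n.toNat := min_eq_left (by omega)
        rw [hmin, hCF n.toNat]
        split_ifs with h <;> omega
    rw [hA, hstab, ← hB, hc]
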